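-- pv_equiv track=rewrite | github.com/mumez/tonel-smalltalk-parser | src/tonel_smalltalk_parser/bracket_parser.py | _skip_string_literal
-- ===== SOURCE A (Python) =====
-- def _skip_string_literal(content: str, start_pos: int) -> int:
--     """Skip over a string literal starting at start_pos.
--
--     Handles escaped quotes ('').
--
--     Args:
--         content: The content string
--         start_pos: Position of the opening quote
--
--     Returns:
--         Position after the closing quote
--
--     """
--     if content[start_pos] != "'":
--         return start_pos
--
--     pos = start_pos + 1
--
--     while pos < len(content):
--         if content[pos] == "'":
--             # Check for escaped quote
--             if pos + 1 < len(content) and content[pos + 1] == "'":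
--                 pos += 2  # Skip ''
--             else:
--                 return pos + 1  # Skip closing quote
--         else:
--             pos += 1
--
--     # Unclosed string literal - return end of content
--     return len(content)
-- ===== SOURCE B (Python) =====
-- def _skip_string_literal(content: str, start_pos: int) -> int:
--     """Skip over a string literal starting at start_pos.
--
--     Two-stage: split the tail on the escape sequence "''" (greedy
--     left-to-right, exactly the pairing the scanner performs), then walk
--     the pieces; the closing quote is the first lone quote in any piece.
--     """
--     if content[start_pos] != "'":
--         return start_pos
--
--     pos = start_pos + 1
--     for piece in content[pos:].split("''"):
--         i = piece.find("'")
--         if i != -1: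
--             return pos + i + 1  # position after the closing quote
--         pos += len(piece) + 2   # skip the piece and the '' separator
--     return len(content)         # unclosed string literal
-- ===== Notes on version B (the rewrite author's own statement) =====
-- stated objective: alternative
-- what changed: Replaces A's single per-character scan by a two-stage method: split the tail on the escape sequence "''" (Python's left-to-right non-overlapping split is exactly the scanner's greedy pairing), then walk the resulting pieces and return after the first lone quote found in a piece.
-- outside the precondition, e.g. on _skip_string_literal("'a''", -2): A returns 4, B returns 0
import Mathlib
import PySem

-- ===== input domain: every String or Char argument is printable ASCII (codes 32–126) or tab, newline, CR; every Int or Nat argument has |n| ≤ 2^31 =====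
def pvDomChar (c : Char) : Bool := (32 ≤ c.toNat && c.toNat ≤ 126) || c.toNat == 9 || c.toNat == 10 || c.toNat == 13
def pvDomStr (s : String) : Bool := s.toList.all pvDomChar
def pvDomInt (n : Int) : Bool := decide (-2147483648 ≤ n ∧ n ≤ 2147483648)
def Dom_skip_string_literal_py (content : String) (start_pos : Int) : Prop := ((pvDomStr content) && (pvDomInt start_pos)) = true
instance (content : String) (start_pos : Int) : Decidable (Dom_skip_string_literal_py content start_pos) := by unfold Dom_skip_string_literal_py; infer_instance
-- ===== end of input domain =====

-- B replaces A's per-character scan by a two-stage method (split the tail on "''", then walk the pieces); alternative decomposition, same O(n) cost.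


-- ===== PORT A =====
-- the 'while pos < len(content)' loop of A, step for step
def pvLoopA (cs : List Char) (pos : Int) : Int :=
  if pos < (cs.length : Int) then
    if PySem.List.pyGet? cs pos = some '\'' then
      if (pos + 1 < (cs.length : Int)) ∧ PySem.List.pyGet? cs (pos + 1) = some '\'' then
        pvLoopA cs (pos + 2)                   -- pos += 2  (skip '')
      else pos + 1                             -- return pos + 1
    else pvLoopA cs (pos + 1)                  -- pos += 1
  else (cs.length : Int)                       -- unclosed: return len(content)
termination_by ((cs.length : Int) - pos).toNat
decreasing_by all_goals omega

def skip_string_literal_py (content : String) (start_pos : Int) : Int :=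
  if ¬ (PySem.Str.pyGet? content start_pos = some '\'') then start_pos
  else pvLoopA content.toList (start_pos + 1)

-- ===== PORT B =====
-- the 'for piece in …' loop of B: walk the pieces of the split, accumulating pos
def pvLoopB (pieces : List (List Char)) (pos : Int) (n : Int) : Int :=
  match pieces with
  | [] => n                                              -- loop exhausted: return len(content)
  | p :: rest =>
    let i := PySem.Chars.find p ['\'']                   -- i = piece.find("'")
    if i ≠ -1 then pos + i + 1                           -- return pos + i + 1
    else pvLoopB rest (pos + (p.length : Int) + 2) n     -- pos += len(piece) + 2

def skip_string_literal_py_alt (content : String) (start_pos : Int) : Int :=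
  if ¬ (PySem.Str.pyGet? content start_pos = some '\'') then start_pos
  else
    let pos := start_pos + 1
    pvLoopB (PySem.Chars.splitOn (PySem.List.slice content.toList (some pos) none) ['\'', '\''])
      pos (content.toList.length : Int)

-- ===== PRECONDITION & SPEC =====
-- Pre_ excludes start_pos out of range (Python raises IndexError) and negative in-range start_pos that wrap onto a
-- quote, where Python's negative-index wraparound makes A scan from a negative position and return an accidental
-- value (e.g. A returns 4 and B returns 0 on ("'a''", -2)); negative start_pos wrapping onto a non-quote (both return
-- start_pos unchanged) stays inside Pre_.
def Pre_skip_string_literal_py (content : String) (start_pos : Int) : Prop :=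
  (0 ≤ start_pos ∧ start_pos < (content.toList.length : Int)) ∨
    (-(content.toList.length : Int) ≤ start_pos ∧ start_pos < 0 ∧
      ¬ PySem.Str.pyGet? content start_pos = some '\'')
instance (content : String) (start_pos : Int) : Decidable (Pre_skip_string_literal_py content start_pos) := by
  unfold Pre_skip_string_literal_py; infer_instance

def pvWitness_skip_string_literal_py : String × Int := ("'ab''c' x", 0)

def Spec_skip_string_literal_py (content : String) (start_pos : Int) (out : Int) : Prop := out = skip_string_literal_py_alt content start_pos
instance (content : String) (start_pos : Int) (out : Int) : Decidable (Spec_skip_string_literal_py content start_pos out) := by unfold Spec_skip_string_literal_py; infer_instance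

-- ===== CLAIM (what is proved, stated in full; the proofs are below) =====
def Claim_equal_skip_string_literal_py : Prop := ∀ (content : String) (start_pos : Int), Dom_skip_string_literal_py content start_pos → Pre_skip_string_literal_py content start_pos → Spec_skip_string_literal_py content start_pos (skip_string_literal_py content start_pos)

-- ===== LEMMAS AND PROOFS =====

-- clean structural recursion computing splitOn l "''" (proof-side model of the split)
def pvSplit : List Char → List (List Char)
  | [] => [[]]
  | c :: t =>
    if ['\'', '\''] <+: (c :: t) then [] :: pvSplit (t.drop 1)
    else (pvSplit t).modifyHead (c :: ·)
termination_by l => l.length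
decreasing_by all_goals (simp only [List.length_drop, List.length_cons]; omega)

theorem pvSplit_ne_nil (l : List Char) : pvSplit l ≠ [] := by
  have H : ∀ n (l : List Char), l.length ≤ n → pvSplit l ≠ [] := by
    intro n
    induction n with
    | zero =>
      intro l hl
      have hl0 : l = [] := List.length_eq_zero_iff.mp (Nat.le_zero.mp hl)
      rw [hl0]
      simp [pvSplit]
    | succ n ih =>
      intro l hl
      cases l with
      | nil => simp [pvSplit]
      | cons c t =>
        rw [pvSplit]
        split
        · simp
        · have ht := ih t (by simp at hl; omega)
          cases h : pvSplit t with
          | nil => exact absurd h ht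
          | cons p ps => simp [List.modifyHead]
  exact H l.length l le_rfl

-- splitOn.go with enough fuel computes pvSplit (up to the accumulators)
theorem pvGo_eq (fuel : Nat) (l cur : List Char) (acc : List (List Char)) (h : l.length < fuel) :
    PySem.Chars.splitOn.go ['\'', '\''] fuel l cur acc
      = acc.reverse ++ (pvSplit l).modifyHead (cur.reverse ++ ·) := by
  induction fuel generalizing l cur acc with
  | zero => omega
  | succ fuel ih =>
    cases l with
    | nil => simp [PySem.Chars.splitOn.go, pvSplit, List.modifyHead]
    | cons c t =>
      rw [PySem.Chars.splitOn.go]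
      by_cases hp : ['\'', '\''] <+: (c :: t)
      · have hp' : (['\'', '\''].isPrefixOf (c :: t)) = true := by
          rw [List.isPrefixOf_iff_prefix]; exact hp
        rw [if_pos hp']
        have ht : ∃ r, t = '\'' :: r := by
          obtain ⟨r, hr⟩ := hp
          injection hr with h1 h2
          exact ⟨r, by simpa using h2.symm⟩
        obtain ⟨r, hr⟩ := ht
        have hlen : (t.drop 1).length < fuel := by
          have hh := h
          simp only [List.length_cons] at hh
          simp only [List.length_drop]
          omega
        have hdrop : List.drop (['\'', '\''] : List Char).length (c :: t) = t.drop 1 := rfl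
        rw [hdrop, ih (t.drop 1) [] _ hlen]
        rw [pvSplit, if_pos hp]
        cases h' : pvSplit (t.drop 1) with
        | nil => exact absurd h' (pvSplit_ne_nil _)
        | cons p ps => simp [List.modifyHead]
      · have hp' : ¬ (['\'', '\''].isPrefixOf (c :: t)) = true := by
          rw [List.isPrefixOf_iff_prefix]; exact hp
        rw [if_neg hp']
        rw [ih t (c :: cur) acc (by simp only [List.length_cons] at h; omega)]
        rw [pvSplit, if_neg hp]
        congr 1
        cases hs : pvSplit t with
        | nil => exact absurd hs (pvSplit_ne_nil t)
        | cons p ps => simp [List.modifyHead]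

theorem pvSplitOn_eq (l : List Char) : PySem.Chars.splitOn l ['\'', '\''] = pvSplit l := by
  rw [PySem.Chars.splitOn, pvGo_eq (l.length + 1) l [] [] (by omega)]
  cases hs : pvSplit l with
  | nil => exact absurd hs (pvSplit_ne_nil l)
  | cons p ps => simp [List.modifyHead]

-- a one-element pattern is a prefix of cs.drop i exactly when cs[i]? is that element
theorem pvQuote_prefix_iff (cs : List Char) (i : Nat) :
    (['\''] <+: cs.drop i) ↔ cs[i]? = some '\'' := by
  rw [← List.head?_drop]
  cases cs.drop i with
  | nil => simp
  | cons b t => simp [List.cons_prefix_cons, eq_comm]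

-- find "'" in the empty piece
theorem pvFind_nil : PySem.Chars.find ([] : List Char) ['\''] = -1 := by decide

-- find "'" in a piece that starts with a quote
theorem pvFind_quote_head (h : List Char) : PySem.Chars.find ('\'' :: h) ['\''] = 0 := by
  have hpre : (['\''] : List Char) <+: ('\'' :: h) := ⟨h, rfl⟩
  have h0 : 0 ≤ PySem.Chars.find ('\'' :: h) ['\''] :=
    (PySem.Chars.find_nonneg_iff _ _).2 hpre.isInfix
  obtain ⟨-, hmin⟩ := PySem.Chars.find_spec h0
  by_contra hne
  exact hmin 0 (by omega) hpre

-- find "'" skips over a non-quote head character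
theorem pvFind_cons_ne (c : Char) (h : List Char) (hc : c ≠ '\'') :
    PySem.Chars.find (c :: h) ['\'']
      = if PySem.Chars.find h ['\''] = -1 then -1 else PySem.Chars.find h ['\''] + 1 := by
  have hinf : ((['\''] : List Char) <:+: (c :: h)) ↔ ((['\''] : List Char) <:+: h) := by
    rw [List.singleton_infix_iff, List.singleton_infix_iff, List.mem_cons]
    constructor
    · rintro (hq | hq)
      · exact absurd hq.symm hc
      · exact hq
    · exact Or.inr
  by_cases hn : PySem.Chars.find h ['\''] = -1
  · rw [if_pos hn]
    rw [PySem.Chars.find_eq_neg_one_iff] at hn ⊢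
    exact fun hx => hn (hinf.1 hx)
  · rw [if_neg hn]
    have hh : (['\''] : List Char) <:+: h := by
      by_contra habs
      exact hn ((PySem.Chars.find_eq_neg_one_iff _ _).2 habs)
    have h0h : 0 ≤ PySem.Chars.find h ['\''] := (PySem.Chars.find_nonneg_iff _ _).2 hh
    have h0c : 0 ≤ PySem.Chars.find (c :: h) ['\''] :=
      (PySem.Chars.find_nonneg_iff _ _).2 (hinf.2 hh)
    obtain ⟨ha1, ha2⟩ := PySem.Chars.find_spec h0c
    obtain ⟨hb1, hb2⟩ := PySem.Chars.find_spec h0h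
    set r := PySem.Chars.find (c :: h) ['\''] with hr
    set r' := PySem.Chars.find h ['\''] with hr'
    have hdrop : ∀ k : Nat, (c :: h).drop (k + 1) = h.drop k := fun k => rfl
    have hrne : r.toNat ≠ 0 := by
      intro hz
      rw [hz, List.drop_zero] at ha1
      obtain ⟨s, hs⟩ := ha1
      injection hs with h1 h2
      exact hc h1.symm
    have hle1 : r.toNat ≤ r'.toNat + 1 := by
      by_contra hgt
      have := ha2 (r'.toNat + 1) (by omega)
      rw [hdrop] at this
      exact this hb1
    have hle2 : r'.toNat + 1 ≤ r.toNat := by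
      by_contra hgt
      have := hb2 (r.toNat - 1) (by omega)
      rw [← hdrop (r.toNat - 1)] at this
      have he : r.toNat - 1 + 1 = r.toNat := by omega
      rw [he] at this
      exact this ha1
    omega

-- walking pieces whose first piece gained a non-quote head = walking from one position further on
theorem pvLoopB_modifyHead (c : Char) (L : List (List Char)) (pos n : Int)
    (hc : c ≠ '\'') (hL : L ≠ []) :
    pvLoopB (L.modifyHead (c :: ·)) pos n = pvLoopB L (pos + 1) n := by
  cases L with
  | nil => exact absurd rfl hL
  | cons p rest =>
    simp only [List.modifyHead_cons, pvLoopB]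
    rw [pvFind_cons_ne c p hc]
    by_cases hn : PySem.Chars.find p ['\''] = -1
    · rw [if_pos hn, hn]
      rw [if_neg (by simp), if_neg (by simp)]
      congr 1
      simp only [List.length_cons]
      push_cast
      ring
    · have h0 : 0 ≤ PySem.Chars.find p ['\''] := by
        have := PySem.Chars.neg_one_le_find p ['\'']
        omega
      rw [if_neg hn]
      rw [if_pos (by omega), if_pos hn]
      ring

-- the two loops agree from every Nat start position
theorem pvLoops_eq (cs : List Char) (pos : Nat) :
    pvLoopA cs (pos : Int) = pvLoopB (pvSplit (cs.drop pos)) (pos : Int) (cs.length : Int) := by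
  have H : ∀ m (pos : Nat), cs.length - pos ≤ m →
      pvLoopA cs (pos : Int) = pvLoopB (pvSplit (cs.drop pos)) (pos : Int) (cs.length : Int) := by
    intro m
    induction m with
    | zero =>
      intro pos hb
      have hlen : cs.length ≤ pos := by omega
      rw [pvLoopA, if_neg (by exact_mod_cast not_lt.2 hlen)]
      rw [List.drop_of_length_le hlen]
      simp [pvSplit, pvLoopB, pvFind_nil]
    | succ m ih =>
      intro pos hb
      by_cases hlt : pos < cs.length
      · have hdrop : cs.drop pos = cs[pos] :: cs.drop (pos + 1) := List.drop_eq_getElem_cons hlt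
        have hget : PySem.List.pyGet? cs (pos : Int) = some cs[pos] := by
          rw [PySem.List.pyGet?_natCast, List.getElem?_eq_getElem hlt]
        have hc1 : (pos : Int) + 1 = ((pos + 1 : Nat) : Int) := by push_cast; ring
        by_cases hq : cs[pos] = '\''
        · by_cases hesc : pos + 1 < cs.length ∧ cs[pos + 1]? = some '\''
          · -- escaped quote '' : both sides skip two characters
            have hget1 : PySem.List.pyGet? cs ((pos : Int) + 1) = some '\'' := by
              rw [hc1, PySem.List.pyGet?_natCast]; exact hesc.2
            have hq1 : cs[pos + 1] = '\'' := by
              have h2 := hesc.2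
              rwa [List.getElem?_eq_getElem hesc.1, Option.some_inj] at h2
            have hdrop2 : cs.drop (pos + 1) = '\'' :: cs.drop (pos + 2) := by
              rw [List.drop_eq_getElem_cons hesc.1, hq1]
            rw [pvLoopA, if_pos (by exact_mod_cast hlt), hget, if_pos (by rw [hq]),
                if_pos ⟨by exact_mod_cast hesc.1, hget1⟩]
            rw [hdrop, hq, hdrop2, pvSplit.eq_def]
            simp only [if_pos (show ['\'', '\''] <+: ('\'' :: '\'' :: cs.drop (pos + 2)) from
              ⟨cs.drop (pos + 2), rfl⟩)]
            have hd1 : ('\'' :: cs.drop (pos + 2)).drop 1 = cs.drop (pos + 2) := rfl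
            rw [hd1]
            simp only [pvLoopB, pvFind_nil]
            rw [if_neg (by simp)]
            have hc2 : (pos : Int) + ((List.length ([] : List Char) : Nat) : Int) + 2
                = ((pos + 2 : Nat) : Int) := by
              simp only [List.length_nil, Nat.cast_zero]
              push_cast
              ring
            rw [hc2]
            exact ih (pos + 2) (by omega)
          · -- lone quote: A returns pos+1; B's first piece starts with the quote, find = 0
            rw [pvLoopA, if_pos (by exact_mod_cast hlt), hget, if_pos (by rw [hq])]
            rw [if_neg (by
              rintro ⟨h1, h2⟩
              rw [hc1, PySem.List.pyGet?_natCast] at h2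
              exact hesc ⟨by exact_mod_cast h1, h2⟩)]
            rw [hdrop, hq, pvSplit.eq_def]
            have hnp : ¬ (['\'', '\''] <+: ('\'' :: cs.drop (pos + 1))) := by
              rw [List.cons_prefix_cons]
              rintro ⟨-, hp⟩
              rw [pvQuote_prefix_iff] at hp
              obtain ⟨hlt1, -⟩ := List.getElem?_eq_some_iff.mp hp
              exact hesc ⟨hlt1, hp⟩
            simp only [if_neg hnp]
            cases hs : pvSplit (cs.drop (pos + 1)) with
            | nil => exact absurd hs (pvSplit_ne_nil _)
            | cons p ps =>
              simp only [List.modifyHead_cons, pvLoopB, pvFind_quote_head]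
              rw [if_pos (by omega)]
              omega
        · -- non-quote character: both sides step one character forward
          rw [pvLoopA, if_pos (by exact_mod_cast hlt), if_neg (by simp [hget, hq])]
          rw [hdrop, pvSplit.eq_def]
          have hnp : ¬ (['\'', '\''] <+: (cs[pos] :: cs.drop (pos + 1))) := by
            rw [List.cons_prefix_cons]
            rintro ⟨hp, -⟩
            exact hq hp.symm
          simp only [if_neg hnp]
          rw [pvLoopB_modifyHead cs[pos] _ _ _ hq (pvSplit_ne_nil _)]
          rw [hc1]
          exact ih (pos + 1) (by omega)
      · rw [pvLoopA, if_neg (by exact_mod_cast not_lt.2 (by omega : cs.length ≤ pos))]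
        rw [List.drop_of_length_le (by omega)]
        simp [pvSplit, pvLoopB, pvFind_nil]
  exact H (cs.length - pos) pos (le_refl _)

-- ===== VERDICT (by name: the statement is the Claim_ definition above) =====
theorem skip_string_literal_py_spec : Claim_equal_skip_string_literal_py := by
  intro content start_pos _hdom hpre
  unfold Spec_skip_string_literal_py skip_string_literal_py skip_string_literal_py_alt
  by_cases hg : PySem.Str.pyGet? content start_pos = some '\''
  · simp only [hg, not_true_eq_false, if_false]
    have h0 : 0 ≤ start_pos := by
      rcases hpre with h | h
      · exact h.1
      · exact absurd hg h.2.2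
    obtain ⟨k, hk⟩ : ∃ k : Nat, start_pos + 1 = (k : Int) := ⟨(start_pos + 1).toNat, by omega⟩
    rw [hk, PySem.List.slice_from_natCast, pvSplitOn_eq]
    exact pvLoops_eq content.toList k
  · have hg' : ¬ PySem.List.pyGet? content.toList start_pos = some '\'' := by
      simpa using hg
    simp [hg']
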